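-- pv_equiv track=rewrite | github.com/steve-bakos/nlp_project | multilingual_eval/datasets/realignment_dataset.py | add_identical_words
-- ===== SOURCE A (Python) =====
-- def add_identical_words(left_tokens, right_tokens, aligned_left_ids, aligned_right_ids):
--     """
--     Add identical words found in both sentences
--     """
--     new_aligned_left_ids = []
--     new_aligned_right_ids = []
--
--     for left_pos, left_token in enumerate(left_tokens):
--         if left_tokens.count(left_token) > 1:
--             continue
--         for right_pos, right_token in enumerate(right_tokens):
--             if (
--                 right_tokens.count(right_token) == 1
--                 and left_token == right_token
--                 and left_pos not in aligned_left_ids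
--                 and right_pos not in aligned_right_ids
--             ):
--                 new_aligned_left_ids.append(left_pos)
--                 new_aligned_right_ids.append(right_pos)
--
--     return new_aligned_left_ids, new_aligned_right_ids
-- ===== SOURCE B (Python) =====
-- def add_identical_words(left_tokens, right_tokens, aligned_left_ids, aligned_right_ids):
--     """
--     Add identical words found in both sentences
--     """
--     left_count = {}
--     for t in left_tokens:
--         left_count[t] = left_count.get(t, 0) + 1
--     right_count = {}
--     for t in right_tokens:
--         right_count[t] = right_count.get(t, 0) + 1
--     right_pos = {}
--     for i, t in enumerate(right_tokens):
--         right_pos[t] = i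
--     left_used = set(aligned_left_ids)
--     right_used = set(aligned_right_ids)
--     new_aligned_left_ids = []
--     new_aligned_right_ids = []
--     for i, t in enumerate(left_tokens):
--         if left_count[t] == 1 and right_count.get(t, 0) == 1:
--             j = right_pos[t]
--             if i not in left_used and j not in right_used:
--                 new_aligned_left_ids.append(i)
--                 new_aligned_right_ids.append(j)
--     return new_aligned_left_ids, new_aligned_right_ids
-- ===== Notes on version B (the rewrite author's own statement) =====
-- stated objective: faster
-- what changed: Replaced the nested scan with repeated list.count calls by precomputed count dictionaries, a token-to-position dictionary and membership sets, so the result is produced in one linear pass over left_tokens.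
import Mathlib
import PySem

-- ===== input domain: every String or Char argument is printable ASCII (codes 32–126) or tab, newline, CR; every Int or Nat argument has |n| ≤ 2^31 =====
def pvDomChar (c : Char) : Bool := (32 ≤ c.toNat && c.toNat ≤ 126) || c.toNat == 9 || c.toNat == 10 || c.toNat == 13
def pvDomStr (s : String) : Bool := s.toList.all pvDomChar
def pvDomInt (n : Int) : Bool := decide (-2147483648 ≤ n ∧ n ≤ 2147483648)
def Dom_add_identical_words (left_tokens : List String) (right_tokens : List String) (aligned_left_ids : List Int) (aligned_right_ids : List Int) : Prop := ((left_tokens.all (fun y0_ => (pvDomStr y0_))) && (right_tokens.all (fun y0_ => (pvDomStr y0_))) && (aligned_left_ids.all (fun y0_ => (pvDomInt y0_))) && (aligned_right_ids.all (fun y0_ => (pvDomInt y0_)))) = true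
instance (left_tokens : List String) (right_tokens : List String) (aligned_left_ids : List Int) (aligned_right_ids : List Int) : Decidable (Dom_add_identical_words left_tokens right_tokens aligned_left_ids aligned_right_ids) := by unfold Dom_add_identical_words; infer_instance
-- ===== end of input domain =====

-- B replaces A's nested scans with repeated list.count calls by precomputed count/position
-- dictionaries and membership sets, producing the same pairs in one linear pass (objective: faster).


-- ===== PORT A =====
def add_identical_words (left_tokens : List String) (right_tokens : List String) (aligned_left_ids : List Int) (aligned_right_ids : List Int) : List Int × List Int :=
  (PySem.List.enumerate left_tokens 0).foldl
    (fun acc it =>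
      if PySem.List.count left_tokens it.2 > 1 then acc
      else
        (PySem.List.enumerate right_tokens 0).foldl
          (fun acc2 it2 =>
            if PySem.List.count right_tokens it2.2 = 1 ∧ it.2 = it2.2 ∧
                it.1 ∉ aligned_left_ids ∧ it2.1 ∉ aligned_right_ids then
              (acc2.1 ++ [it.1], acc2.2 ++ [it2.1])
            else acc2) acc)
    ([], [])

-- ===== PORT B =====
def add_identical_words_alt (left_tokens : List String) (right_tokens : List String) (aligned_left_ids : List Int) (aligned_right_ids : List Int) : List Int × List Int :=
  let left_count := left_tokens.foldl (fun d t => d.insert t (d.getD t 0 + 1)) (PySem.Dict.empty : PySem.Dict String Int)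
  let right_count := right_tokens.foldl (fun d t => d.insert t (d.getD t 0 + 1)) (PySem.Dict.empty : PySem.Dict String Int)
  let right_pos := (PySem.List.enumerate right_tokens 0).foldl (fun d it => d.insert it.2 it.1) (PySem.Dict.empty : PySem.Dict String Int)
  let left_used := PySem.Set.ofList aligned_left_ids
  let right_used := PySem.Set.ofList aligned_right_ids
  (PySem.List.enumerate left_tokens 0).foldl
    (fun acc it =>
      if left_count.getD it.2 0 = 1 ∧ right_count.getD it.2 0 = 1 then
        let j := right_pos.getD it.2 0
        if ¬ left_used.contains it.1 ∧ ¬ right_used.contains j then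
          (acc.1 ++ [it.1], acc.2 ++ [j])
        else acc
      else acc)
    ([], [])

-- ===== PRECONDITION & SPEC =====
def Spec_add_identical_words (left_tokens : List String) (right_tokens : List String) (aligned_left_ids : List Int) (aligned_right_ids : List Int) (out : List Int × List Int) : Prop := out = add_identical_words_alt left_tokens right_tokens aligned_left_ids aligned_right_ids
instance (left_tokens : List String) (right_tokens : List String) (aligned_left_ids : List Int) (aligned_right_ids : List Int) (out : List Int × List Int) : Decidable (Spec_add_identical_words left_tokens right_tokens aligned_left_ids aligned_right_ids out) := by unfold Spec_add_identical_words; infer_instance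

-- ===== CLAIM (what is proved, stated in full; the proofs are below) =====
def Claim_equal_add_identical_words : Prop := ∀ (left_tokens : List String) (right_tokens : List String) (aligned_left_ids : List Int) (aligned_right_ids : List Int), Dom_add_identical_words left_tokens right_tokens aligned_left_ids aligned_right_ids → Spec_add_identical_words left_tokens right_tokens aligned_left_ids aligned_right_ids (add_identical_words left_tokens right_tokens aligned_left_ids aligned_right_ids)

-- ===== LEMMAS AND PROOFS =====

-- A's inner loop does nothing when lt cannot match (not unique in R, or lp already aligned).
lemma innerA_none (R : List String) (al ar : List Int) (lt : String) (lp : Int)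
    (h : ¬ (R.count lt = 1 ∧ lp ∉ al)) :
    ∀ (rl : List String) (s : Int) (acc : List Int × List Int),
      (PySem.List.enumerate rl s).foldl
        (fun acc2 it2 =>
          if PySem.List.count R it2.2 = 1 ∧ lt = it2.2 ∧ lp ∉ al ∧ it2.1 ∉ ar then
            (acc2.1 ++ [lp], acc2.2 ++ [it2.1])
          else acc2) acc = acc := by
  intro rl
  induction rl with
  | nil => intro s acc; simp [PySem.List.enumerate_nil]
  | cons r rest ih =>
    intro s acc
    rw [PySem.List.enumerate_cons, List.foldl_cons]
    have hstep : (if PySem.List.count R r = 1 ∧ lt = r ∧ lp ∉ al ∧ s ∉ ar then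
        (acc.1 ++ [lp], acc.2 ++ [s]) else acc) = acc := by
      rw [if_neg]
      rintro ⟨h1, h2, h3, _⟩
      exact h ⟨by simpa [PySem.List.count_eq, h2] using h1, h3⟩
    rw [hstep, ih]

-- A's inner loop does nothing on a suffix not containing lt.
lemma innerA_not_mem (R : List String) (al ar : List Int) (lt : String) (lp : Int) :
    ∀ (rl : List String), lt ∉ rl → ∀ (s : Int) (acc : List Int × List Int),
      (PySem.List.enumerate rl s).foldl
        (fun acc2 it2 =>
          if PySem.List.count R it2.2 = 1 ∧ lt = it2.2 ∧ lp ∉ al ∧ it2.1 ∉ ar then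
            (acc2.1 ++ [lp], acc2.2 ++ [it2.1])
          else acc2) acc = acc := by
  intro rl
  induction rl with
  | nil => intro _ s acc; simp [PySem.List.enumerate_nil]
  | cons r rest ih =>
    intro hnm s acc
    rw [PySem.List.enumerate_cons, List.foldl_cons]
    have hstep : (if PySem.List.count R r = 1 ∧ lt = r ∧ lp ∉ al ∧ s ∉ ar then
        (acc.1 ++ [lp], acc.2 ++ [s]) else acc) = acc := by
      rw [if_neg]
      rintro ⟨_, h2, _, _⟩
      exact hnm (h2 ▸ List.mem_cons_self)
    rw [hstep, ih (fun hm => hnm (List.mem_cons_of_mem r hm)) (s + 1)]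

-- A's inner loop, when lt is unique in R and lp is free, appends the unique match (if its
-- position is free).
lemma innerA_found (R : List String) (al ar : List Int) (lt : String) (lp : Int)
    (hR : R.count lt = 1) (hal : lp ∉ al) :
    ∀ (rl : List String), rl.count lt = 1 → ∀ (s : Int) (acc : List Int × List Int),
      (PySem.List.enumerate rl s).foldl
        (fun acc2 it2 =>
          if PySem.List.count R it2.2 = 1 ∧ lt = it2.2 ∧ lp ∉ al ∧ it2.1 ∉ ar then
            (acc2.1 ++ [lp], acc2.2 ++ [it2.1])
          else acc2) acc
      = if (s + (rl.idxOf lt : Int)) ∉ ar then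
          (acc.1 ++ [lp], acc.2 ++ [s + (rl.idxOf lt : Int)]) else acc := by
  intro rl
  induction rl with
  | nil => intro h; simp at h
  | cons r rest ih =>
    intro hcnt s acc
    rw [PySem.List.enumerate_cons, List.foldl_cons]
    by_cases hr : lt = r
    · subst hr  -- r := lt
      have hrest : lt ∉ rest := by
        have := hcnt
        rw [List.count_cons_self] at this
        exact List.count_eq_zero.mp (by omega)
      rw [innerA_not_mem R al ar lt lp rest hrest]
      have hRc : PySem.List.count R lt = 1 := by simpa [PySem.List.count_eq] using hR
      rw [List.idxOf_cons_self]
      by_cases har : s ∈ ar <;> simp [PySem.List.count_eq, hR, hal, har]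
    · have hstep : (if PySem.List.count R r = 1 ∧ lt = r ∧ lp ∉ al ∧ s ∉ ar then
          (acc.1 ++ [lp], acc.2 ++ [s]) else acc) = acc := by
        rw [if_neg]; rintro ⟨_, h2, _, _⟩; exact hr h2
      rw [hstep]
      have hr' : ¬ r = lt := fun h => hr h.symm
      have hcnt' : rest.count lt = 1 := by
        simpa [List.count_cons, hr'] using hcnt
      rw [ih hcnt' (s + 1) acc, List.idxOf_cons_ne _ hr']
      have : s + 1 + (rest.idxOf lt : Int) = s + ((rest.idxOf lt + 1 : Nat) : Int) := by
        push_cast; ring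
      rw [← this]

-- B's position dictionary: untouched keys keep their value.
lemma posFold_not_mem (rl : List String) (lt : String) :
    lt ∉ rl → ∀ (s : Int) (d : PySem.Dict String Int),
      ((PySem.List.enumerate rl s).foldl (fun d it => d.insert it.2 it.1) d).get? lt = d.get? lt := by
  induction rl with
  | nil => intro _ s d; simp [PySem.List.enumerate_nil]
  | cons r rest ih =>
    intro hnm s d
    rw [PySem.List.enumerate_cons, List.foldl_cons]
    rw [ih (fun hm => hnm (List.mem_cons_of_mem r hm)) (s + 1)]
    exact PySem.Dict.get?_insert_of_ne d s (fun h => hnm (h ▸ List.mem_cons_self))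

-- B's position dictionary holds the unique index of a token occurring exactly once.
lemma posFold_unique (rl : List String) (lt : String) :
    rl.count lt = 1 → ∀ (s : Int) (d : PySem.Dict String Int),
      ((PySem.List.enumerate rl s).foldl (fun d it => d.insert it.2 it.1) d).get? lt
        = some (s + (rl.idxOf lt : Int)) := by
  induction rl with
  | nil => intro h; simp at h
  | cons r rest ih =>
    intro hcnt s d
    rw [PySem.List.enumerate_cons, List.foldl_cons]
    by_cases hr : lt = r
    · subst hr  -- r := lt
      have hrest : lt ∉ rest := by
        rw [List.count_cons_self] at hcnt
        exact List.count_eq_zero.mp (by omega)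
      rw [posFold_not_mem rest lt hrest (s + 1), PySem.Dict.get?_insert_self,
        List.idxOf_cons_self]
      simp
    · have hr' : ¬ r = lt := fun h => hr h.symm
      have hcnt' : rest.count lt = 1 := by
        simpa [List.count_cons, hr'] using hcnt
      rw [ih hcnt' (s + 1), List.idxOf_cons_ne _ hr']
      congr 1
      push_cast; ring

-- ===== VERDICT (by name: the statement is the Claim_ definition above) =====
theorem add_identical_words_spec : Claim_equal_add_identical_words := by
  intro L R al ar _hdom
  unfold Spec_add_identical_words add_identical_words add_identical_words_alt
  simp only []
  apply PySem.List.foldl_congr_mem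
  intro acc it hmem
  rw [PySem.List.mem_enumerate_iff] at hmem
  obtain ⟨k, hk, hit⟩ := hmem
  have hmemL : it.2 ∈ L := by rw [hit]; exact List.getElem_mem hk
  have hLpos : 1 ≤ L.count it.2 := List.one_le_count_iff.mpr hmemL
  have hLC : (L.foldl (fun d t => d.insert t (d.getD t 0 + 1)) (PySem.Dict.empty : PySem.Dict String Int)).getD it.2 0 = (L.count it.2 : Int) := by
    rw [PySem.Dict.getD_foldl_insert_add_one]; simp [PySem.Dict.getD]
  have hRC : (R.foldl (fun d t => d.insert t (d.getD t 0 + 1)) (PySem.Dict.empty : PySem.Dict String Int)).getD it.2 0 = (R.count it.2 : Int) := by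
    rw [PySem.Dict.getD_foldl_insert_add_one]; simp [PySem.Dict.getD]
  by_cases hL1 : PySem.List.count L it.2 > 1
  · rw [if_pos hL1, if_neg]
    rw [hLC]
    rw [PySem.List.count_eq] at hL1
    rintro ⟨h1, _⟩
    omega
  · rw [if_neg hL1]
    rw [PySem.List.count_eq] at hL1
    have hLeq : L.count it.2 = 1 := by omega
    by_cases hR1 : R.count it.2 = 1
    · -- right token unique
      have hpos := posFold_unique R it.2 hR1 0 PySem.Dict.empty
      have hgetD : ((PySem.List.enumerate R 0).foldl (fun d it => d.insert it.2 it.1) (PySem.Dict.empty : PySem.Dict String Int)).getD it.2 0 = (R.idxOf it.2 : Int) := by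
        rw [PySem.Dict.getD_eq_get?_getD, hpos]; simp
      rw [if_pos ⟨by rw [hLC, hLeq]; rfl, by rw [hRC, hR1]; rfl⟩]
      simp only [hgetD]
      by_cases hal : it.1 ∈ al
      · rw [innerA_none R al ar it.2 it.1 (fun h => h.2 hal), if_neg]
        rintro ⟨h1, _⟩
        exact h1 (by simpa [PySem.Set.contains_iff, PySem.Set.mem_ofList] using hal)
      · rw [innerA_found R al ar it.2 it.1 hR1 hal R hR1 0 acc]
        simp only [zero_add]
        by_cases har : (R.idxOf it.2 : Int) ∈ ar
        · rw [if_neg (by simpa using har), if_neg]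
          rintro ⟨_, h2⟩
          exact h2 (by simpa [PySem.Set.contains_iff, PySem.Set.mem_ofList] using har)
        · rw [if_pos (by simpa using har), if_pos]
          constructor
          · simpa [PySem.Set.contains_iff, PySem.Set.mem_ofList] using hal
          · simpa [PySem.Set.contains_iff, PySem.Set.mem_ofList] using har
    · -- right token not unique: neither side appends
      rw [innerA_none R al ar it.2 it.1 (fun h => hR1 h.1), if_neg]
      rw [hRC]
      rintro ⟨_, h2⟩
      exact hR1 (by exact_mod_cast h2)
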